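-- pv_equiv track=rewrite | github.com/unlearning/python-algorithm | silver/programmers/day7/진료순서 정하기.py | solution
-- ===== SOURCE A (Python) =====
-- def solution(emergency):
--     a_d = []
--     s_answer = sorted(emergency, reverse=True)
--     answer = [i for i in range(1, len(s_answer) + 1)]
--     dic = dict(zip(s_answer, answer))
--     for i in emergency:
--         for j in dic:
--             if i == j:
--                 a_d.append(dic[i])
--     return a_d
-- ===== SOURCE B (Python) =====
-- def solution(emergency):
--     # rank of i = number of severities at least as large as i, in one nested pass
--     return [sum(1 for x in emergency if x >= i) for i in emergency]
-- ===== Notes on version B (the rewrite author's own statement) =====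
-- stated objective: simpler
-- what changed: Replaces sort + rank dict + per-element scan over dict keys by directly counting, for each element, how many elements are >= it (which is exactly the rank A's duplicate-overwriting dict assigns).
import Mathlib
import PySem

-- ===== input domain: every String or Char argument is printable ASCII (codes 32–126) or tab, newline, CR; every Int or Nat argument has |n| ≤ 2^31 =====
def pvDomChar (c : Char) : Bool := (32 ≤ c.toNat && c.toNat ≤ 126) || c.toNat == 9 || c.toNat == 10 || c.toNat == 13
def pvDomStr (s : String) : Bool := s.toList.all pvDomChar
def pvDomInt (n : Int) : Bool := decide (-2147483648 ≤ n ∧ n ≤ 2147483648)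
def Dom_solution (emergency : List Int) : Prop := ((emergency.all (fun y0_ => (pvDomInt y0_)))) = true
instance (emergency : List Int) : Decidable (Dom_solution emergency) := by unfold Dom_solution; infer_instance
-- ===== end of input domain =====

-- B replaces A's sort + rank dict + per-element key scan by directly counting, for each
-- element, how many elements are ≥ it (the rank A's duplicate-overwriting dict assigns); simpler.

-- ===== PORT A =====
def solution (emergency : List Int) : List Int :=
  let s_answer := PySem.List.sorted emergency (fun x => x) true
  let answer := (PySem.List.pyRange 1 ((s_answer.length : Int) + 1)).map (fun i => i)
  let dic := PySem.Dict.ofList (s_answer.zip answer)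
  -- dic[i] is guarded by 'i == j' for a key j of dic, so the key is present; getD is exact here
  emergency.foldl (fun a_d i =>
    dic.keys.foldl (fun a_d j =>
      if i == j then a_d ++ [dic.getD i 0] else a_d) a_d) []

-- ===== PORT B =====
def solution_alt (emergency : List Int) : List Int :=
  emergency.map (fun i => ((emergency.countP (fun x => decide (i ≤ x)) : Nat) : Int))

-- ===== PRECONDITION & SPEC =====
def Spec_solution (emergency : List Int) (out : List Int) : Prop := out = solution_alt emergency
instance (emergency : List Int) (out : List Int) : Decidable (Spec_solution emergency out) := by unfold Spec_solution; infer_instance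

-- ===== CLAIM (what is proved, stated in full; the proofs are below) =====
def Claim_equal_solution : Prop := ∀ (emergency : List Int), Dom_solution emergency → Spec_solution emergency (solution emergency)

-- ===== LEMMAS AND PROOFS =====

-- proof-only helper: the list [c, c+1, …, c+n-1]
def pvRanks (c : Int) : Nat → List Int
  | 0 => []
  | n + 1 => c :: pvRanks (c + 1) n

theorem pvRanks_length (c : Int) (n : Nat) : (pvRanks c n).length = n := by
  induction n generalizing c with
  | zero => rfl
  | succ n ih => simp [pvRanks, ih]

theorem pyRange_eq_pvRanks (n : Nat) (c : Int) :
    PySem.List.pyRange c (c + n) = pvRanks c n := by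
  induction n generalizing c with
  | zero => simp [pvRanks, PySem.List.pyRange]
  | succ n ih =>
    rw [PySem.List.pyRange_one_cons (by omega)]
    have : (c : Int) + (n + 1 : Nat) = (c + 1) + n := by push_cast; ring
    rw [this, ih (c + 1)]
    rfl

theorem getD_foldl_ins_not_mem (ps : List (Int × Int)) (d : PySem.Dict Int Int)
    (k : Int) (h : k ∉ ps.map Prod.fst) :
    (ps.foldl (fun d p => d.insert p.1 p.2) d).getD k 0 = d.getD k 0 := by
  induction ps generalizing d with
  | nil => rfl
  | cons p t ih =>
    simp only [List.map_cons, List.mem_cons] at h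
    push Not at h
    simp only [List.foldl_cons]
    rw [ih _ h.2, PySem.Dict.getD_insert_of_ne _ _ _ h.1]

-- key lemma: in dict(zip(s, [c+1, …, c+len s])) with s sorted descending, looking
-- up i ∈ s yields c + (number of elements of s that are ≥ i)
theorem getD_zip_ranks (s : List Int) (hs : s.Pairwise (fun a b => b ≤ a)) :
    ∀ (c : Int) (d : PySem.Dict Int Int) (i : Int), i ∈ s →
      ((s.zip (pvRanks (c + 1) s.length)).foldl (fun d p => d.insert p.1 p.2) d).getD i 0
        = c + (s.countP (fun x => decide (i ≤ x)) : Int) := by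
  induction s with
  | nil => intro c d i hi; cases hi
  | cons a t ih =>
    intro c d i hi
    rw [List.pairwise_cons] at hs
    have hle : i ≤ a := by
      rcases List.mem_cons.mp hi with rfl | hit
      · exact le_refl _
      · exact hs.1 i hit
    have hcnt : (a :: t).countP (fun x => decide (i ≤ x))
        = t.countP (fun x => decide (i ≤ x)) + 1 := by
      simp [hle]
    simp only [List.length_cons, pvRanks, List.zip_cons_cons, List.foldl_cons]
    by_cases hit : i ∈ t
    · have := ih hs.2 (c + 1) (d.insert a (c + 1)) i hit
      rw [show (c : Int) + 1 + 1 = (c + 1) + 1 from rfl] at this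
      rw [this, hcnt]
      push_cast; ring
    · have hia : i = a := by
        rcases List.mem_cons.mp hi with rfl | h
        · rfl
        · exact absurd h hit
      subst hia
      have hzero : t.countP (fun x => decide (i ≤ x)) = 0 := by
        apply List.countP_eq_zero.mpr
        intro x hx
        simp only [decide_eq_true_eq]
        intro hix
        exact hit (by have := le_antisymm (hs.1 x hx) hix; rwa [this] at hx)
      have hnm : i ∉ (t.zip (pvRanks (c + 1 + 1) t.length)).map Prod.fst := by
        rw [List.map_fst_zip (by rw [pvRanks_length])]
        exact hit
      rw [getD_foldl_ins_not_mem _ _ _ hnm, PySem.Dict.getD_insert_self, hcnt, hzero]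
      push_cast; ring

theorem filter_beq_nodup_mem (l : List Int) (i : Int) (hnd : l.Nodup) (hi : i ∈ l) :
    l.filter (fun j => i == j) = [i] := by
  have : (fun j : Int => i == j) = (fun j : Int => j == i) := by
    funext j; simp [eq_comm]
  rw [this, List.filter_beq, List.count_eq_one_of_mem hnd hi, List.replicate_one]

-- ===== VERDICT (by name: the statement is the Claim_ definition above) =====
theorem solution_spec : Claim_equal_solution := by
  intro e _
  unfold Spec_solution solution solution_alt
  simp only []
  set s := PySem.List.sorted e (fun x => x) true with hs_def
  have hperm : s.Perm e := PySem.List.sorted_perm e (fun x => x) true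
  have hpw : s.Pairwise (fun a b => b ≤ a) :=
    PySem.List.sorted_pairwise_rev e (fun x => x)
  -- the rank list is [1, …, len s]
  have hrange : (PySem.List.pyRange 1 ((s.length : Int) + 1)).map (fun i => i)
      = pvRanks 1 s.length := by
    rw [List.map_id']
    rw [show ((s.length : Int) + 1) = 1 + (s.length : Nat) from by ring]
    exact pyRange_eq_pvRanks s.length 1
  rw [hrange]
  set dic := PySem.Dict.ofList (s.zip (pvRanks 1 s.length)) with hdic
  have hz : (s.zip (pvRanks 1 s.length)).map Prod.fst = s :=
    List.map_fst_zip (by rw [pvRanks_length])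
  have hkeys : dic.keys = PySem.Set.ofList s := by
    show ((s.zip (pvRanks 1 s.length)).foldl (fun d p => d.insert p.1 p.2)
      PySem.Dict.empty).keys = _
    rw [PySem.Dict.keys_foldl_insert_key _ Prod.fst (fun _ p => p.2), hz]
    rfl
  have hnd : dic.keys.Nodup := by rw [hkeys]; exact PySem.Set.nodup_ofList s
  have hget : ∀ i ∈ e, dic.getD i 0 = (e.countP (fun x => decide (i ≤ x)) : Int) := by
    intro i hie
    have his : i ∈ s := hperm.mem_iff.mpr hie
    have := getD_zip_ranks s hpw 0 PySem.Dict.empty i his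
    rw [show (0 : Int) + 1 = 1 from rfl] at this
    rw [hdic]
    show ((s.zip (pvRanks 1 s.length)).foldl (fun d p => d.insert p.1 p.2)
      PySem.Dict.empty).getD i 0 = _
    rw [this, hperm.countP_eq]
    ring
  have hbody : ∀ (acc : List Int), ∀ i ∈ e,
      (dic.keys.foldl (fun a_d j => if (i == j) = true then a_d ++ [dic.getD i 0] else a_d) acc)
        = acc ++ [(e.countP (fun x => decide (i ≤ x)) : Int)] := by
    intro acc i hie
    rw [PySem.List.foldl_append_if (fun j => i == j) (fun _ => dic.getD i 0)]
    rw [filter_beq_nodup_mem _ _ hnd (by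
      rw [hkeys]
      exact (PySem.Set.mem_ofList s i).mpr (hperm.mem_iff.mpr hie))]
    rw [hget i hie]
    rfl
  rw [PySem.List.foldl_congr_mem e _ _ [] hbody,
    PySem.List.foldl_append_singleton_eq_map]
  rfl
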